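-- pv_equiv track=rewrite | github.com/honeyhyuni/algorithm | programmers_level2/jadenCase.py | solution
-- ===== SOURCE A (Python) =====
-- def solution(s):
--     answer = ''
--     s = list(s)
--     answer += s[0].upper()
--     for i in range(1, len(s)):
--         if answer[-1] == " ":
--             answer += s[i].upper()
--         else:
--             answer += s[i].lower()
--     return answer
-- ===== SOURCE B (Python) =====
-- def solution(s):
--     return ' '.join(w[:1].upper() + w[1:].lower() for w in s.split(' '))
-- ===== Notes on version B (the rewrite author's own statement) =====
-- stated objective: faster
-- what changed: A builds the answer character by character, branching on the last character already written; B splits on the single space, maps each word w to w[:1].upper()+w[1:].lower() and joins with ' ' in one expression.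
-- outside the precondition, e.g. on solution(''): A raises IndexError, B returns ''
import Mathlib
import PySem

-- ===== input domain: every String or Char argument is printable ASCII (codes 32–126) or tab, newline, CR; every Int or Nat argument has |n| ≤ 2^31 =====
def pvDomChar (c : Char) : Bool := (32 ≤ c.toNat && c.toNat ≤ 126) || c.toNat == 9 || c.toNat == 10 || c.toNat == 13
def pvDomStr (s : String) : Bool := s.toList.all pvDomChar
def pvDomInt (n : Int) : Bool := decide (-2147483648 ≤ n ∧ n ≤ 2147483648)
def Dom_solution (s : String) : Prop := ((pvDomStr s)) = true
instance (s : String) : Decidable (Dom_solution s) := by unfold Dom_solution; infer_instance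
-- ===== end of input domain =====

-- B replaces A's char-by-char loop (branching on the last character written) by
-- split-on-space / map-each-word / join (O(n) vs A's quadratic string concatenation; measured faster); return values proved equal on
-- every nonempty string (A raises IndexError on "").

-- ===== PORT A =====
-- the for-loop: answer[-1] is the last character written so far
def solutionLoop (ans : List Char) (rest : List Char) : List Char :=
  match rest with
  | [] => ans
  | c :: t =>
    if ans.getLast? == some ' ' then
      solutionLoop (ans ++ [PySem.Chars.upperChar c]) t
    else
      solutionLoop (ans ++ [PySem.Chars.lowerChar c]) t

def solution (s : String) : String :=
  match s.toList with
  | [] => ""   -- Python raises IndexError at s[0]; excluded by Pre_solution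
  | c :: t => String.mk (solutionLoop [PySem.Chars.upperChar c] t)

-- ===== PORT B =====
-- w[:1].upper() + w[1:].lower()
def jadenWord (w : List Char) : List Char :=
  PySem.Chars.upper (PySem.List.slice w none (some 1)) ++
    PySem.Chars.lower (PySem.List.slice w (some 1) none)

def solution_alt (s : String) : String :=
  String.mk (PySem.Chars.join [' '] ((PySem.Chars.splitOn s.toList [' ']).map jadenWord))

-- ===== PRECONDITION & SPEC =====
-- Pre_ excludes only the empty string, on which A raises IndexError at s[0].
def Pre_solution (s : String) : Prop := s ≠ ""
instance (s : String) : Decidable (Pre_solution s) := by unfold Pre_solution; infer_instance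
def pvWitness_solution : String := "hi  woRld"

def Spec_solution (s : String) (out : String) : Prop := out = solution_alt s
instance (s : String) (out : String) : Decidable (Spec_solution s out) := by unfold Spec_solution; infer_instance

-- ===== CLAIM (what is proved, stated in full; the proofs are below) =====
def Claim_equal_solution : Prop := ∀ (s : String), Dom_solution s → Pre_solution s → Spec_solution s (solution s)

-- ===== LEMMAS AND PROOFS =====

-- the case transforms send only ' ' to ' '
theorem upperChar_eq_space_iff (c : Char) : (PySem.Chars.upperChar c = ' ') ↔ c = ' ' := by
  unfold PySem.Chars.upperChar PySem.Chars.islower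
  split_ifs with h
  · simp only [Bool.and_eq_true, decide_eq_true_eq] at h
    constructor
    · intro he
      have h1 : 97 ≤ c.toNat := UInt32.le_iff_toNat_le.mp (Char.le_def.mp h.1)
      have h2 : c.toNat ≤ 122 := UInt32.le_iff_toNat_le.mp (Char.le_def.mp h.2)
      have hv : (Char.ofNat (c.toNat - 32)).toNat = c.toNat - 32 := by
        rw [Char.toNat_ofNat]
        have : Nat.isValidChar (c.toNat - 32) := by left; omega
        simp [this]
      rw [he] at hv
      have hs : (' ' : Char).toNat = 32 := by decide
      omega
    · intro he; subst he; simp_all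
  · tauto

theorem lowerChar_eq_space_iff (c : Char) : (PySem.Chars.lowerChar c = ' ') ↔ c = ' ' := by
  unfold PySem.Chars.lowerChar PySem.Chars.isupper
  split_ifs with h
  · simp only [Bool.and_eq_true, decide_eq_true_eq] at h
    constructor
    · intro he
      have h1 : 65 ≤ c.toNat := UInt32.le_iff_toNat_le.mp (Char.le_def.mp h.1)
      have h2 : c.toNat ≤ 90 := UInt32.le_iff_toNat_le.mp (Char.le_def.mp h.2)
      have hv : (Char.ofNat (c.toNat + 32)).toNat = c.toNat + 32 := by
        rw [Char.toNat_ofNat]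
        have : Nat.isValidChar (c.toNat + 32) := by left; omega
        simp [this]
      rw [he] at hv
      have hs : (' ' : Char).toNat = 32 := by decide
      omega
    · intro he; subst he; simp_all
  · tauto

-- canonical Jaden-case: flag = "previous character was a space (or start)"
def cano (b : Bool) : List Char → List Char
  | [] => []
  | c :: t =>
    (if b then PySem.Chars.upperChar c else PySem.Chars.lowerChar c) ::
      cano (decide (c = ' ')) t

-- A's loop computes cano
theorem loop_eq (t : List Char) : ∀ (ans : List Char) (x : Char), ans.getLast? = some x →
    solutionLoop ans t = ans ++ cano (decide (x = ' ')) t := by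
  induction t with
  | nil => intro ans x _; simp [solutionLoop, cano]
  | cons c t ih =>
    intro ans x hx
    have hb : (ans.getLast? == some ' ') = decide (x = ' ') := by
      rw [hx]; by_cases h : x = ' ' <;> simp [h]
    set c' := if decide (x = ' ') then PySem.Chars.upperChar c else PySem.Chars.lowerChar c with hc'
    have hstep : solutionLoop ans (c :: t) = solutionLoop (ans ++ [c']) t := by
      rw [solutionLoop, hb, hc']
      by_cases h : x = ' ' <;> simp [h]
    rw [hstep, ih (ans ++ [c']) c' (by simp)]
    have : (decide (c' = ' ')) = decide (c = ' ') := by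
      rw [hc']; by_cases h : x = ' ' <;> simp [h, upperChar_eq_space_iff, lowerChar_eq_space_iff]
    rw [this, cano]
    by_cases h : x = ' ' <;> simp [h, hc']

theorem solution_eq_cano (c : Char) (t : List Char) (s : String) (hs : s.toList = c :: t) :
    solution s = String.mk (cano true (c :: t)) := by
  have h1 : solution s = String.mk (solutionLoop [PySem.Chars.upperChar c] t) := by
    unfold solution; rw [hs]
  rw [h1, loop_eq t [PySem.Chars.upperChar c] (PySem.Chars.upperChar c) (by simp)]
  have h2 : (decide (PySem.Chars.upperChar c = ' ')) = decide (c = ' ') := by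
    simp [upperChar_eq_space_iff]
  rw [h2, cano]
  simp

-- simple split on a single space (what Chars.splitOn computes for sep = [' '])
def splitSp (cur : List Char) : List Char → List (List Char)
  | [] => [cur]
  | c :: t => if c = ' ' then cur :: splitSp [] t else splitSp (cur ++ [c]) t

theorem go_eq : ∀ (fuel : Nat) (l cur : List Char) (acc : List (List Char)),
    l.length ≤ fuel →
    PySem.Chars.splitOn.go [' '] fuel l cur acc = acc.reverse ++ splitSp cur.reverse l := by
  intro fuel
  induction fuel with
  | zero =>
    intro l cur acc h
    have : l = [] := by cases l <;> simp_all
    subst this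
    simp [PySem.Chars.splitOn.go, splitSp]
  | succ fuel ih =>
    intro l cur acc h
    cases l with
    | nil => simp [PySem.Chars.splitOn.go, splitSp]
    | cons c rest =>
      rw [PySem.Chars.splitOn.go]
      by_cases hc : c = ' '
      · have hp : ([' '] : List Char).isPrefixOf (c :: rest) = true := by
          simp [List.isPrefixOf, hc]
        rw [if_pos hp]
        subst hc
        have hd : List.drop ([' '] : List Char).length (' ' :: rest) = rest := rfl
        rw [hd, ih rest [] ((List.reverse cur) :: acc) (by simpa using Nat.le_of_succ_le_succ h)]
        simp [splitSp]
      · have hp : ([' '] : List Char).isPrefixOf (c :: rest) = false := by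
          simp [List.isPrefixOf]
          exact fun h' => hc h'.symm
        rw [if_neg (by simp [hp])]
        rw [ih rest (c :: cur) acc (by simpa using Nat.le_of_succ_le_succ h)]
        simp [splitSp, hc]

theorem splitOn_space (l : List Char) :
    PySem.Chars.splitOn l [' '] = splitSp [] l := by
  unfold PySem.Chars.splitOn
  rw [go_eq (l.length + 1) l [] [] (by omega)]
  simp

theorem splitSp_ne_nil (l : List Char) : ∀ cur, splitSp cur l ≠ [] := by
  induction l with
  | nil => intro cur; simp [splitSp]
  | cons c t ih =>
    intro cur
    by_cases hc : c = ' ' <;> simp [splitSp, hc, ih]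

theorem jadenWord_nil : jadenWord [] = [] := by decide

theorem jadenWord_cons (c : Char) (t : List Char) :
    jadenWord (c :: t) = PySem.Chars.upperChar c :: t.map PySem.Chars.lowerChar := by
  unfold jadenWord
  rw [PySem.List.slice_to (c :: t) (by norm_num), PySem.List.slice_from (c :: t) (by norm_num)]
  simp [PySem.Chars.upper, PySem.Chars.lower]

theorem jadenWord_append (cur : List Char) (c : Char) (h : cur ≠ []) :
    jadenWord (cur ++ [c]) = jadenWord cur ++ [PySem.Chars.lowerChar c] := by
  cases cur with
  | nil => exact absurd rfl h
  | cons d t => simp [jadenWord_cons]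

-- joining the jaden-cased words of the split equals cano (joint induction)
theorem join_splitSp (l : List Char) :
    (∀ cur, cur ≠ [] →
      PySem.Chars.join [' '] ((splitSp cur l).map jadenWord)
        = jadenWord cur ++ cano false l) ∧
    PySem.Chars.join [' '] ((splitSp [] l).map jadenWord) = cano true l := by
  induction l with
  | nil =>
    constructor
    · intro cur _
      simp [splitSp, PySem.Chars.join_singleton, cano]
    · simp [splitSp, PySem.Chars.join_singleton, cano, jadenWord_nil]
  | cons c t ih =>
    have hu : PySem.Chars.upperChar ' ' = ' ' := by decide
    have hl : PySem.Chars.lowerChar ' ' = ' ' := by decide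
    obtain ⟨w0, ws0, hsp⟩ : ∃ w0 ws0, splitSp [] t = w0 :: ws0 := by
      cases hx : splitSp [] t with
      | nil => exact absurd hx (splitSp_ne_nil t [])
      | cons a b => exact ⟨a, b, rfl⟩
    have hkey : ∀ cur, cur ≠ [] →
        PySem.Chars.join [' '] ((splitSp cur (c :: t)).map jadenWord)
          = jadenWord cur ++ cano false (c :: t) := by
      intro cur hcur
      by_cases hc : c = ' '
      · subst hc
        rw [show splitSp cur (' ' :: t) = cur :: splitSp [] t from by simp [splitSp]]
        rw [hsp, List.map_cons, List.map_cons, PySem.Chars.join_cons_cons]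
        have h2 : jadenWord w0 :: List.map jadenWord ws0 = List.map jadenWord (splitSp [] t) := by
          rw [hsp]; rfl
        rw [h2, ih.2]
        simp [cano, hl]
      · rw [show splitSp cur (c :: t) = splitSp (cur ++ [c]) t from by simp [splitSp, hc]]
        rw [ih.1 (cur ++ [c]) (by simp), jadenWord_append cur c hcur]
        simp [cano, hc]
    refine ⟨hkey, ?_⟩
    by_cases hc : c = ' '
    · subst hc
      rw [show splitSp [] (' ' :: t) = [] :: splitSp [] t from by simp [splitSp]]
      rw [hsp, List.map_cons, List.map_cons, PySem.Chars.join_cons_cons]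
      have h2 : jadenWord w0 :: List.map jadenWord ws0 = List.map jadenWord (splitSp [] t) := by
        rw [hsp]; rfl
      rw [h2, ih.2]
      simp [cano, hu, jadenWord_nil]
    · rw [show splitSp [] (c :: t) = splitSp [c] t from by simp [splitSp, hc]]
      rw [ih.1 [c] (by simp), jadenWord_cons]
      simp [cano, hc]

theorem alt_eq_cano (s : String) :
    solution_alt s = String.mk (cano true s.toList) := by
  unfold solution_alt
  rw [splitOn_space, (join_splitSp s.toList).2]

-- ===== VERDICT (by name: the statement is the Claim_ definition above) =====
theorem solution_spec : Claim_equal_solution := by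
  intro s _ hp
  unfold Spec_solution
  rw [alt_eq_cano]
  cases hs : s.toList with
  | nil => exact absurd (String.toList_eq_nil_iff.mp hs) hp
  | cons c t => rw [solution_eq_cano c t s hs]
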